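-- pv_equiv track=rewrite | github.com/FigueredoGaston/PythonUNSAM | Clase11/11-13.py | medidas_hoja_A
-- ===== SOURCE A (Python) =====
-- def medidas_hoja_A(N):
--     def doblez(a, b):
--         return round(b/2), a
--
--     ancho = 841
--     largo = 1189
--     if N == 0:
--         return (ancho, largo)
--     else:
--         for i in range(N):
--             ancho, largo = doblez(ancho, largo)
--     return (ancho, largo)
-- ===== SOURCE B (Python) =====
-- def medidas_hoja_A(N):
--     # Precompute the halving chains of both base dimensions once; after a chain
--     # hits 0 every further fold is a no-op, so any N is answered by clamped
--     # indexing: N//2 pair-folds advance both chains one step each, and an odd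
--     # leftover fold takes one extra step on the 1189-chain and swaps.
--     def chain(x):
--         xs = [x]
--         while x:
--             x = round(x / 2)
--             xs.append(x)
--         return xs
--     c841 = chain(841)
--     c1189 = chain(1189)
--     if N <= 0:
--         return (841, 1189)
--     def pick(xs, k):
--         return xs[min(k, len(xs) - 1)]
--     q, r = divmod(N, 2)
--     if r:
--         return (pick(c1189, q + 1), pick(c841, q))
--     else:
--         return (pick(c841, q), pick(c1189, q))
-- ===== Notes on version B (the rewrite author's own statement) =====
-- stated objective: faster
-- what changed: B precomputes the finite halving chains of 841 and 1189 (they reach the fixed point 0 after 11 steps) and answers any N by clamped indexing into the chains (N//2 pair-steps, plus one extra 1189-chain step with a swap for odd N), replacing A's N-iteration swap-and-halve loop.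
import Mathlib
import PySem

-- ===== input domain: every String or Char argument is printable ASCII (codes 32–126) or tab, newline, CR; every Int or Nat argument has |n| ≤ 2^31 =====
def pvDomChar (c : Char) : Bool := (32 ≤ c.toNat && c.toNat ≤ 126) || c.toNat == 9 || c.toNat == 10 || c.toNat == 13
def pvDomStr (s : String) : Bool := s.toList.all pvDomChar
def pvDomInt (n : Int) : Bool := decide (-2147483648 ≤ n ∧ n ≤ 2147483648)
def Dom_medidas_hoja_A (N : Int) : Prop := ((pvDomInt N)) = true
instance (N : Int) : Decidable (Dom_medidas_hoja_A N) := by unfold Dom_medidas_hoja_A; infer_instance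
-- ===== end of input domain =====

-- B precomputes the finite halving chains of 841 and 1189 (which reach the fixed point 0)
-- and answers any N by clamped indexing into them, instead of A's N-iteration fold loop.

-- round(x/2) for an integer x: exact halving when even, banker's rounding (ties to even)
-- on the half-integer otherwise.  Exact for every integer of magnitude ≤ 2^31 (the
-- float x/2 is exact there).
def pvRoundHalf (x : Int) : Int :=
  let k := PySem.Int.floordiv x 2
  if PySem.Int.mod x 2 = 0 then k
  else if PySem.Int.mod k 2 = 0 then k else k + 1

-- ===== PORT A =====
-- doblez(a, b) = (round(b/2), a)
def pvDoblez (s : Int × Int) : Int × Int := (pvRoundHalf s.2, s.1)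

-- the for-loop over range(N): N.toNat iterations of doblez on (ancho, largo)
def pvALoop : Nat → Int × Int → Int × Int
  | 0, s => s
  | n + 1, s => pvALoop n (pvDoblez s)

def medidas_hoja_A (N : Int) : Int × Int :=
  if N = 0 then (841, 1189)
  else pvALoop N.toNat (841, 1189)

-- ===== PORT B =====
-- chain(x): 'xs = [x]; while x: x = round(x/2); xs.append(x)'.  The fuel x.natAbs
-- bounds the while loop exactly: |round(x/2)| < |x| whenever x ≠ 0, so the fuel
-- branch is never the one that stops the recursion.
def pvChainGo : Nat → Int → List Int
  | 0, x => [x]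
  | f + 1, x => if x = 0 then [x] else x :: pvChainGo f (pvRoundHalf x)

def pvChain (x : Int) : List Int := pvChainGo x.natAbs x

-- pick(xs, k) = xs[min(k, len(xs)-1)]; the index is always in range for B's calls
-- (k ≥ 0 and min clamps below len), so the .getD 0 totaliser never fires.
def pvPick (xs : List Int) (k : Int) : Int :=
  (PySem.List.pyGet? xs (min k ((xs.length : Int) - 1))).getD 0

def medidas_hoja_A_alt (N : Int) : Int × Int :=
  let c841 := pvChain 841
  let c1189 := pvChain 1189
  if N ≤ 0 then (841, 1189)
  else
    let q := PySem.Int.floordiv N 2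
    let r := PySem.Int.mod N 2
    if r ≠ 0 then (pvPick c1189 (q + 1), pvPick c841 q)
    else (pvPick c841 q, pvPick c1189 q)

-- ===== PRECONDITION & SPEC =====
def Spec_medidas_hoja_A (N : Int) (out : Int × Int) : Prop := out = medidas_hoja_A_alt N
instance (N : Int) (out : Int × Int) : Decidable (Spec_medidas_hoja_A N out) := by unfold Spec_medidas_hoja_A; infer_instance

-- ===== CLAIM (what is proved, stated in full; the proofs are below) =====
def Claim_equal_medidas_hoja_A : Prop := ∀ (N : Int), Dom_medidas_hoja_A N → Spec_medidas_hoja_A N (medidas_hoja_A N)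

-- ===== LEMMAS AND PROOFS =====

-- the concrete chains
def pvC841 : List Int := [841, 420, 210, 105, 52, 26, 13, 6, 3, 2, 1, 0]
def pvC1189 : List Int := [1189, 594, 297, 148, 74, 37, 18, 9, 4, 2, 1, 0]

theorem pvChain_841 : pvChain 841 = pvC841 := by decide
theorem pvChain_1189 : pvChain 1189 = pvC1189 := by decide

-- Nat-indexed clamped pick
def pickN (xs : List Int) (k : Nat) : Int := xs.getD (min k (xs.length - 1)) 0

theorem pick_step_841 : ∀ k : Nat, pickN pvC841 (k + 1) = pvRoundHalf (pickN pvC841 k) := by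
  intro k
  by_cases h : k < 11
  · exact (by decide : ∀ k < 11, pickN pvC841 (k + 1) = pvRoundHalf (pickN pvC841 k)) k h
  · have h1 : min (k + 1) (pvC841.length - 1) = 11 := by simp [pvC841]; omega
    have h2 : min k (pvC841.length - 1) = 11 := by simp [pvC841]; omega
    unfold pickN
    rw [h1, h2]
    decide

theorem pick_step_1189 : ∀ k : Nat, pickN pvC1189 (k + 1) = pvRoundHalf (pickN pvC1189 k) := by
  intro k
  by_cases h : k < 11
  · exact (by decide : ∀ k < 11, pickN pvC1189 (k + 1) = pvRoundHalf (pickN pvC1189 k)) k h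
  · have h1 : min (k + 1) (pvC1189.length - 1) = 11 := by simp [pvC1189]; omega
    have h2 : min k (pvC1189.length - 1) = 11 := by simp [pvC1189]; omega
    unfold pickN
    rw [h1, h2]
    decide

theorem pvALoop_succ' (n : Nat) (s : Int × Int) :
    pvALoop (n + 1) s = pvDoblez (pvALoop n s) := by
  induction n generalizing s with
  | zero => rfl
  | succ n ih => simpa [pvALoop] using ih (pvDoblez s)

-- A's loop state after 2k and 2k+1 folds, in terms of the chains
theorem pvALoop_key : ∀ k : Nat,
    pvALoop (2 * k) (841, 1189) = (pickN pvC841 k, pickN pvC1189 k) ∧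
    pvALoop (2 * k + 1) (841, 1189) = (pickN pvC1189 (k + 1), pickN pvC841 k) := by
  intro k
  induction k with
  | zero => constructor <;> decide
  | succ k ih =>
      have he : 2 * (k + 1) = (2 * k + 1) + 1 := by ring
      have heven : pvALoop (2 * (k + 1)) (841, 1189)
          = (pickN pvC841 (k + 1), pickN pvC1189 (k + 1)) := by
        rw [he, pvALoop_succ', ih.2]
        simp [pvDoblez, pick_step_841, pick_step_1189]
      refine ⟨heven, ?_⟩
      rw [pvALoop_succ', heven]
      simp [pvDoblez, pick_step_1189]

-- pvPick at a Nat-cast index agrees with pickN on the concrete chains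
theorem pvPick_eq_pickN_841 (k : Nat) : pvPick pvC841 (k : Int) = pickN pvC841 k := by
  by_cases h : k < 12
  · exact (by decide : ∀ m : Nat, m < 12 → pvPick pvC841 (m : Int) = pickN pvC841 m) k h
  · unfold pvPick pickN
    have h1 : min (k : Int) ((pvC841.length : Int) - 1) = ((11 : Nat) : Int) := by
      simp [pvC841]; omega
    have h2 : min k (pvC841.length - 1) = 11 := by simp [pvC841]; omega
    rw [h1, h2, PySem.List.pyGet?_natCast]
    decide

theorem pvPick_eq_pickN_1189 (k : Nat) : pvPick pvC1189 (k : Int) = pickN pvC1189 k := by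
  by_cases h : k < 12
  · exact (by decide : ∀ m : Nat, m < 12 → pvPick pvC1189 (m : Int) = pickN pvC1189 m) k h
  · unfold pvPick pickN
    have h1 : min (k : Int) ((pvC1189.length : Int) - 1) = ((11 : Nat) : Int) := by
      simp [pvC1189]; omega
    have h2 : min k (pvC1189.length - 1) = 11 := by simp [pvC1189]; omega
    rw [h1, h2, PySem.List.pyGet?_natCast]
    decide

-- ===== VERDICT (by name: the statement is the Claim_ definition above) =====
theorem medidas_hoja_A_spec : Claim_equal_medidas_hoja_A := by
  intro N _
  unfold Spec_medidas_hoja_A medidas_hoja_A medidas_hoja_A_alt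
  by_cases hpos : N ≤ 0
  · have h0 : N.toNat = 0 := by omega
    by_cases h0' : N = 0 <;> simp [h0', hpos, h0, pvALoop]
  · rw [not_le] at hpos
    have hne : N ≠ 0 := by omega
    simp only [hne, if_neg (by omega : ¬ N ≤ 0), if_false, pvChain_841, pvChain_1189]
    have hfd : PySem.Int.floordiv N 2 = N / 2 :=
      PySem.Int.floordiv_eq_ediv_of_pos (by norm_num)
    have hmd : PySem.Int.mod N 2 = N % 2 :=
      PySem.Int.mod_eq_emod_of_pos (by norm_num)
    set n := N.toNat with hn
    have hN : (n : Int) = N := by omega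
    have hq : N / 2 = ((n / 2 : Nat) : Int) := by omega
    have hq1 : N / 2 + 1 = ((n / 2 + 1 : Nat) : Int) := by omega
    have hr : N % 2 = ((n % 2 : Nat) : Int) := by omega
    rw [hfd, hmd] at *
    rcases Nat.even_or_odd n with ⟨k, hk⟩ | ⟨k, hk⟩
    · have hk2 : n = 2 * k := by omega
      have hr0 : N % 2 = 0 := by omega
      have hqk : N / 2 = ((k : Nat) : Int) := by omega
      simp only [hr0, ne_eq, not_true_eq_false, if_false, hqk]
      rw [hk2, (pvALoop_key k).1, pvPick_eq_pickN_841, pvPick_eq_pickN_1189]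
    · have hk2 : n = 2 * k + 1 := by omega
      have hr1 : N % 2 = 1 := by omega
      have hqk : N / 2 = ((k : Nat) : Int) := by omega
      have hqk1 : N / 2 + 1 = ((k + 1 : Nat) : Int) := by omega
      simp only [hr1, ne_eq, one_ne_zero, not_false_eq_true, if_true, hqk]
      have hc : ((k : Int) + 1) = ((k + 1 : Nat) : Int) := by omega
      rw [hk2, (pvALoop_key k).2, hc, pvPick_eq_pickN_841, pvPick_eq_pickN_1189]
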